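-- pv_equiv track=rewrite | github.com/robotikklinja/Machine-Vision | OpevCV_prat/Al_test.py | not_cards
-- ===== SOURCE A (Python) =====
-- from itertools import combinations
--
-- def not_cards(array):
--     # Initialize a set to store sums (sets automatically avoid duplicates)
--     valid_sums = set()
--
--     # Iterate over all possible numbers of elements to combine (1 to 4)
--     for r in range(1, len(array) + 1):
--         # Generate all combinations of length r
--         for combination in combinations(array, r):
--             # Calculate the sum of the combination
--             total = sum(combination)
--             # Check if the sum is less than or equal to 16
--             if total <= 16:
--                 valid_sums.add(total)
--
--     # Convert the set to a sorted list
--     valid_sums = sorted(valid_sums)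
--
--     return valid_sums
-- ===== SOURCE B (Python) =====
-- def not_cards(array):
--     # Incremental subset-sum DP: one pass maintaining the set of sums
--     # reachable by nonempty subsets of the prefix seen so far.
--     sums = set()
--     for x in array:
--         sums = sums | {s + x for s in sums} | {x}
--     return sorted(s for s in sums if s <= 16)
-- ===== Notes on version B (the rewrite author's own statement) =====
-- stated objective: faster
-- what changed: Replaced the enumeration of all 2^n combinations (itertools.combinations for every length r) by a one-pass incremental subset-sum DP that maintains the set of sums reachable by nonempty subsets of the prefix, filtering <=16 only at the end.
import Mathlib
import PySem

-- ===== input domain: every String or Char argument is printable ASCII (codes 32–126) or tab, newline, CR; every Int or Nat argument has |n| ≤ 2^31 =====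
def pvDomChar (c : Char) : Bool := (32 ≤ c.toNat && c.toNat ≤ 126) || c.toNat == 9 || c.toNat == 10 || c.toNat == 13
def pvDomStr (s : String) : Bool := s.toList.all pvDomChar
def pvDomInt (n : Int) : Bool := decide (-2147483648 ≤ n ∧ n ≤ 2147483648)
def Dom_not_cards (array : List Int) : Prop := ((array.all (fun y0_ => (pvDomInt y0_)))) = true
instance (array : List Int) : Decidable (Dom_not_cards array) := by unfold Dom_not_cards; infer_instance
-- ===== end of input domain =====

-- B replaces A's enumeration of all combinations of every length by a one-pass
-- incremental subset-sum DP over the array (faster; equivalence of return values proved below).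

-- ===== PORT A =====
def not_cards (array : List Int) : List Int :=
  let validSums : PySem.Set Int :=
    (PySem.List.pyRange 1 ((array.length : Int) + 1) 1).foldl (fun vs r =>
      (PySem.List.combinations array r.toNat).foldl (fun vs c =>
        let total := c.sum
        if total ≤ 16 then PySem.Set.add vs total else vs) vs)
      PySem.Set.empty
  PySem.List.sorted validSums (fun x => x) false

-- ===== PORT B =====
def not_cards_alt (array : List Int) : List Int :=
  let sums : PySem.Set Int :=
    array.foldl (fun sums x =>
      PySem.Set.union (PySem.Set.union sums (PySem.Set.ofList (sums.map (· + x))))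
        (PySem.Set.ofList [x]))
      PySem.Set.empty
  PySem.List.sorted (sums.filter (fun s => decide (s ≤ 16))) (fun x => x) false

-- ===== PRECONDITION & SPEC =====
def Spec_not_cards (array : List Int) (out : List Int) : Prop := out = not_cards_alt array
instance (array : List Int) (out : List Int) : Decidable (Spec_not_cards array out) := by unfold Spec_not_cards; infer_instance

-- ===== CLAIM (what is proved, stated in full; the proofs are below) =====
def Claim_equal_not_cards : Prop := ∀ (array : List Int), Dom_not_cards array → Spec_not_cards array (not_cards array)

-- ===== LEMMAS AND PROOFS =====

-- the membership predicate both sides compute: t is a nonempty-subsequence sum of l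
def NSum (l : List Int) (t : Int) : Prop := ∃ c : List Int, c.Sublist l ∧ c ≠ [] ∧ c.sum = t

-- A's inner loop over the combinations of one length
theorem mem_inner (cs : List (List Int)) (vs : PySem.Set Int) (t : Int) :
    t ∈ cs.foldl (fun vs c => if c.sum ≤ 16 then PySem.Set.add vs c.sum else vs) vs ↔
      t ∈ vs ∨ ∃ c ∈ cs, c.sum = t ∧ t ≤ 16 := by
  induction cs generalizing vs with
  | nil => simp
  | cons c cs ih =>
    simp only [List.foldl_cons]
    by_cases h : c.sum ≤ 16
    · rw [if_pos h, ih]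
      simp only [PySem.Set.mem_add, List.mem_cons]
      constructor
      · rintro ((hv | rfl) | ⟨c', hc', hs, ht⟩)
        · exact Or.inl hv
        · exact Or.inr ⟨c, Or.inl rfl, rfl, h⟩
        · exact Or.inr ⟨c', Or.inr hc', hs, ht⟩
      · rintro (hv | ⟨c', (rfl | hc'), hs, ht⟩)
        · exact Or.inl (Or.inl hv)
        · exact Or.inl (Or.inr hs.symm)
        · exact Or.inr ⟨c', hc', hs, ht⟩
    · rw [if_neg h, ih]
      simp only [List.mem_cons]
      constructor
      · rintro (hv | ⟨c', hc', hs, ht⟩)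
        · exact Or.inl hv
        · exact Or.inr ⟨c', Or.inr hc', hs, ht⟩
      · rintro (hv | ⟨c', (rfl | hc'), hs, ht⟩)
        · exact Or.inl hv
        · exact absurd (hs ▸ ht) h
        · exact Or.inr ⟨c', hc', hs, ht⟩

theorem nodup_inner (cs : List (List Int)) (vs : PySem.Set Int) (h : vs.Nodup) :
    (cs.foldl (fun vs c => if c.sum ≤ 16 then PySem.Set.add vs c.sum else vs) vs).Nodup := by
  induction cs generalizing vs with
  | nil => exact h
  | cons c cs ih =>
    simp only [List.foldl_cons]
    split
    · exact ih _ (PySem.Set.nodup_add _ _ h)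
    · exact ih _ h

-- A's outer loop
theorem mem_outer (rs : List Int) (array : List Int) (vs : PySem.Set Int) (t : Int) :
    t ∈ rs.foldl (fun vs r =>
        (PySem.List.combinations array r.toNat).foldl (fun vs c =>
          if c.sum ≤ 16 then PySem.Set.add vs c.sum else vs) vs) vs ↔
      t ∈ vs ∨ ∃ r ∈ rs, ∃ c ∈ PySem.List.combinations array r.toNat, c.sum = t ∧ t ≤ 16 := by
  induction rs generalizing vs with
  | nil => simp
  | cons r rs ih =>
    simp only [List.foldl_cons]
    rw [ih, mem_inner]
    simp only [List.mem_cons]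
    constructor
    · rintro ((hv | ⟨c, hc, hs, ht⟩) | ⟨r', hr', c, hc, hs, ht⟩)
      · exact Or.inl hv
      · exact Or.inr ⟨r, Or.inl rfl, c, hc, hs, ht⟩
      · exact Or.inr ⟨r', Or.inr hr', c, hc, hs, ht⟩
    · rintro (hv | ⟨r', (rfl | hr'), c, hc, hs, ht⟩)
      · exact Or.inl (Or.inl hv)
      · exact Or.inl (Or.inr ⟨c, hc, hs, ht⟩)
      · exact Or.inr ⟨r', hr', c, hc, hs, ht⟩

theorem nodup_outer (rs : List Int) (array : List Int) (vs : PySem.Set Int) (h : vs.Nodup) :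
    (rs.foldl (fun vs r =>
        (PySem.List.combinations array r.toNat).foldl (fun vs c =>
          if c.sum ≤ 16 then PySem.Set.add vs c.sum else vs) vs) vs).Nodup := by
  induction rs generalizing vs with
  | nil => exact h
  | cons r rs ih =>
    simp only [List.foldl_cons]
    exact ih _ (nodup_inner _ _ h)

-- A's set holds exactly the nonempty-subsequence sums ≤ 16
theorem mem_a (array : List Int) (t : Int) :
    t ∈ (PySem.List.pyRange 1 ((array.length : Int) + 1) 1).foldl (fun vs r =>
        (PySem.List.combinations array r.toNat).foldl (fun vs c =>
          if c.sum ≤ 16 then PySem.Set.add vs c.sum else vs) vs) PySem.Set.empty ↔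
      NSum array t ∧ t ≤ 16 := by
  rw [mem_outer]
  simp only [PySem.Set.empty, List.not_mem_nil, false_or]
  constructor
  · rintro ⟨r, hr, c, hc, hs, ht⟩
    rw [PySem.List.mem_pyRange_one] at hr
    rw [PySem.List.mem_combinations_iff] at hc
    refine ⟨⟨c, hc.1, ?_, hs⟩, ht⟩
    intro hnil
    subst hnil
    simp at hc
    omega
  · rintro ⟨⟨c, hsub, hne, hs⟩, ht⟩
    refine ⟨(c.length : Int), ?_, c, ?_, hs, ht⟩
    · rw [PySem.List.mem_pyRange_one]
      have h1 : 1 ≤ c.length := List.length_pos_of_ne_nil hne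
      have h2 : c.length ≤ array.length := hsub.length_le
      omega
    · rw [PySem.List.mem_combinations_iff]
      exact ⟨hsub, by simp⟩

-- B's DP step
def bstep (sums : PySem.Set Int) (x : Int) : PySem.Set Int :=
  PySem.Set.union (PySem.Set.union sums (PySem.Set.ofList (sums.map (· + x))))
    (PySem.Set.ofList [x])

theorem nodup_bfold (l : List Int) :
    (l.foldl bstep PySem.Set.empty).Nodup := by
  induction l using List.reverseRecOn with
  | nil => simp [PySem.Set.empty]
  | append_singleton l x ih =>
    rw [List.foldl_append, List.foldl_cons, List.foldl_nil]
    exact PySem.Set.nodup_union _ _ (PySem.Set.nodup_union _ _ ih)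

-- B's set holds exactly the nonempty-subsequence sums
theorem mem_b (l : List Int) (t : Int) :
    t ∈ l.foldl bstep PySem.Set.empty ↔ NSum l t := by
  induction l using List.reverseRecOn generalizing t with
  | nil =>
    simp only [List.foldl_nil, PySem.Set.empty, List.not_mem_nil, false_iff]
    rintro ⟨c, hsub, hne, -⟩
    exact hne (List.sublist_nil.mp hsub)
  | append_singleton l x ih =>
    rw [List.foldl_append, List.foldl_cons, List.foldl_nil]
    have hst : ∀ t' : Int, t' ∈ bstep (l.foldl bstep PySem.Set.empty) x ↔
        t' ∈ l.foldl bstep PySem.Set.empty ∨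
          (∃ s ∈ l.foldl bstep PySem.Set.empty, s + x = t') ∨ t' = x := by
      intro t'
      unfold bstep
      rw [PySem.Set.mem_union, PySem.Set.mem_union, PySem.Set.mem_ofList, PySem.Set.mem_ofList]
      simp only [List.mem_map, List.mem_singleton]
      rw [or_assoc]
    rw [hst t]
    simp only [ih]
    constructor
    · rintro (⟨c, hsub, hne, hs⟩ | ⟨s, ⟨c, hsub, hne, hs⟩, hsx⟩ | hx)
      · exact ⟨c, hsub.trans (List.sublist_append_left l [x]), hne, hs⟩
      · exact ⟨c ++ [x], hsub.append (List.Sublist.refl [x]), by simp, by simp [hs, hsx]⟩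
      · exact ⟨[x], List.sublist_append_right l [x], by simp, by simp [hx]⟩
    · rintro ⟨c, hsub, hne, hs⟩
      rcases List.sublist_append_iff.mp hsub with ⟨a, b, rfl, ha, hb⟩
      rcases List.sublist_singleton.mp hb with rfl | rfl
      · exact Or.inl ⟨a, ha, by simpa using hne, by simpa using hs⟩
      · rcases eq_or_ne a [] with rfl | hane
        · exact Or.inr (Or.inr (by simpa using hs.symm))
        · exact Or.inr (Or.inl ⟨a.sum, ⟨a, ha, hane, rfl⟩, by simpa using hs⟩)

-- ===== VERDICT (by name: the statement is the Claim_ definition above) =====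
theorem not_cards_spec : Claim_equal_not_cards := by
  intro array _
  unfold Spec_not_cards not_cards not_cards_alt
  rw [PySem.List.sorted_id_eq_sorted_id_iff_perm]
  apply (List.perm_ext_iff_of_nodup (nodup_outer _ _ _ (by simp [PySem.Set.empty])) ((nodup_bfold array).filter _)).mpr
  intro t
  rw [mem_a, List.mem_filter, mem_b]
  simp
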